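-- pv_equiv track=rewrite | github.com/ejaj/process-mining | basic_alpha_miner.py | construct_footprint_matrix
-- ===== SOURCE A (Python) =====
-- def construct_footprint_matrix(direct_succession, causality, parallel, choice):
--     activities = set(direct_succession.keys())
--
--     # Initialize an empty footprint matrix
--     footprint_matrix = {}
--
--     for x in activities:
--         footprint_matrix[x] = {}
--         for y in activities:
--             if x == y:
--                 # No relation with itself
--                 footprint_matrix[x][y] = None
--             elif y in causality.get(x, set()):
--                 # Causality relation (x -> y)
--                 footprint_matrix[x][y] = "->"
--             elif x in direct_succession.get(y, set()) and y not in direct_succession.get(x, set()):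
--                 # Direct succession relation (x > y)
--                 footprint_matrix[x][y] = ">"
--             elif x in parallel.get(y, set()):
--                 # Parallel relation (x || y)
--                 footprint_matrix[x][y] = "||"
--             elif x in choice.get(y, set()):
--                 # Choice relation (x # y)
--                 footprint_matrix[x][y] = "#"
--
--     return footprint_matrix
-- ===== SOURCE B (Python) =====
-- def construct_footprint_matrix(direct_succession, causality, parallel, choice):
--     activities = set(direct_succession.keys())
--
--     # Scatter pass: one sparse dict of pair -> symbol, written in reverse
--     # priority order so that later writes win (causality strongest).
--     rel = {}
--     for y, xs in choice.items():
--         for x in xs: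
--             rel[(x, y)] = "#"
--     for y, xs in parallel.items():
--         for x in xs:
--             rel[(x, y)] = "||"
--     for y, xs in direct_succession.items():
--         for x in xs:
--             if y not in direct_succession.get(x, set()):
--                 rel[(x, y)] = ">"
--     for x, ys in causality.items():
--         for y in ys:
--             rel[(x, y)] = "->"
--
--     # Gather pass: assemble the matrix over activity pairs only.
--     return {x: {y: (None if x == y else rel[(x, y)])
--                 for y in activities if x == y or (x, y) in rel}
--             for x in activities}
-- ===== Notes on version B (the rewrite author's own statement) =====
-- stated objective: faster
-- what changed: A fills every cell by running a 5-way elif chain of relation lookups/list-membership tests for each of the n^2 activity pairs; B instead does one scatter pass over the four relation dicts building a sparse pair->symbol dict in reverse priority order (later writes win), then a gather pass that assembles the matrix with a single dict lookup per pair.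
import Mathlib
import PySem

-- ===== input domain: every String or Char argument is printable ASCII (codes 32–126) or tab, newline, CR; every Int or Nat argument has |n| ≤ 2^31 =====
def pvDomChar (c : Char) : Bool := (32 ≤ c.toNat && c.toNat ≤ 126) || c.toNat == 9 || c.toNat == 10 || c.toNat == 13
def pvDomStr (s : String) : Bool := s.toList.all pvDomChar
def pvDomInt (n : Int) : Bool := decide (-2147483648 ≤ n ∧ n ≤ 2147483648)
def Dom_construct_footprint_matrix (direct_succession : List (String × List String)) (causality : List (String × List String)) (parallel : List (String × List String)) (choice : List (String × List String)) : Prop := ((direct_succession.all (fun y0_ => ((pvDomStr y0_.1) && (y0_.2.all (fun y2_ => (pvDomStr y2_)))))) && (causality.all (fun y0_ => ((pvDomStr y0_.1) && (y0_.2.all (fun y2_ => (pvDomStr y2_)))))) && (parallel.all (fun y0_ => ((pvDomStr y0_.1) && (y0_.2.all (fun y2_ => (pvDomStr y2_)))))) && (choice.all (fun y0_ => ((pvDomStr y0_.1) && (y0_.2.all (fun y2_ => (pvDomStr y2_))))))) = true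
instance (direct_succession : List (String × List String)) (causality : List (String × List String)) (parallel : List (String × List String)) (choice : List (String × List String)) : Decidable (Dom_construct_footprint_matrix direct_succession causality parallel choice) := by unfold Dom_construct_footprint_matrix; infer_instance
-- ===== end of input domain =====

-- ===== PORT A =====
-- B restructures A's per-cell elif chain into a scatter pass over the relation
-- edges followed by a gather pass (same result; an alternative decomposition).
-- Dicts are assoc lists (first-match lookup); set iteration is ported in
-- first-occurrence order (outputs are compared as dicts, ignoring order).

-- d.get(k, set()) on an assoc-list dict: first match, default empty
def pvGetD (d : List (String × List String)) (k : String) : List String :=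
  match d.find? (fun p => p.1 == k) with
  | some p => p.2
  | none => []

-- literal port of A: for each x, for each y, the elif chain; dict assignment at
-- a fresh key (x resp. y, distinct since activities is a set) appends.
def construct_footprint_matrix (direct_succession : List (String × List String)) (causality : List (String × List String)) (parallel : List (String × List String)) (choice : List (String × List String)) : List (String × List (String × Option String)) :=
  let activities := PySem.Set.ofList (direct_succession.map Prod.fst)
  activities.foldl (fun m x =>
    m ++ [(x, activities.foldl (fun r y =>
      if x == y then r ++ [(y, (none : Option String))]
      else if (pvGetD causality x).contains y then r ++ [(y, some "->")]
      else if (pvGetD direct_succession y).contains x && !((pvGetD direct_succession x).contains y) then r ++ [(y, some ">")]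
      else if (pvGetD parallel y).contains x then r ++ [(y, some "||")]
      else if (pvGetD choice y).contains x then r ++ [(y, some "#")]
      else r) [])]) []

-- ===== PORT B =====
-- literal port of Source B: scatter the four relations into a pair->symbol dict in
-- reverse priority order (later writes overwrite), then gather over activities.
def construct_footprint_matrix_alt (direct_succession : List (String × List String)) (causality : List (String × List String)) (parallel : List (String × List String)) (choice : List (String × List String)) : List (String × List (String × Option String)) :=
  let activities := PySem.Set.ofList (direct_succession.map Prod.fst)
  let rel : PySem.Dict (String × String) String :=
    choice.foldl (fun r p => p.2.foldl (fun r x => r.insert (x, p.1) "#") r) PySem.Dict.empty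
  let rel := parallel.foldl (fun r p => p.2.foldl (fun r x => r.insert (x, p.1) "||") r) rel
  let rel := direct_succession.foldl (fun r p => p.2.foldl (fun r x =>
      if !((pvGetD direct_succession x).contains p.1) then r.insert (x, p.1) ">" else r) r) rel
  let rel := causality.foldl (fun r p => p.2.foldl (fun r y => r.insert (p.1, y) "->") r) rel
  activities.map (fun x => (x, activities.filterMap (fun y =>
    if x == y then some (y, (none : Option String))
    else match rel.get? (x, y) with
      | some s => some (y, some s)
      | none => none)))

-- ===== PRECONDITION & SPEC =====
-- Pre_ excludes association lists with duplicate keys: no Python dict produces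
-- them, and on such raw lists first-match lookup (A) and full iteration (B)
-- are both defensible readings.
def Pre_construct_footprint_matrix (direct_succession : List (String × List String)) (causality : List (String × List String)) (parallel : List (String × List String)) (choice : List (String × List String)) : Prop :=
  (direct_succession.map Prod.fst).Nodup ∧ (causality.map Prod.fst).Nodup ∧
  (parallel.map Prod.fst).Nodup ∧ (choice.map Prod.fst).Nodup
instance (direct_succession : List (String × List String)) (causality : List (String × List String)) (parallel : List (String × List String)) (choice : List (String × List String)) : Decidable (Pre_construct_footprint_matrix direct_succession causality parallel choice) := by unfold Pre_construct_footprint_matrix; infer_instance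

def pvWitness_construct_footprint_matrix : (List (String × List String)) × (List (String × List String)) × (List (String × List String)) × (List (String × List String)) :=
  ([("a", ["b"]), ("b", [])], [("a", ["b"])], [], [("b", ["a"])])

def Spec_construct_footprint_matrix (direct_succession : List (String × List String)) (causality : List (String × List String)) (parallel : List (String × List String)) (choice : List (String × List String)) (out : List (String × List (String × Option String))) : Prop := out = construct_footprint_matrix_alt direct_succession causality parallel choice
instance (direct_succession : List (String × List String)) (causality : List (String × List String)) (parallel : List (String × List String)) (choice : List (String × List String)) (out : List (String × List (String × Option String))) : Decidable (Spec_construct_footprint_matrix direct_succession causality parallel choice out) := by unfold Spec_construct_footprint_matrix; infer_instance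

-- ===== CLAIM (what is proved, stated in full; the proofs are below) =====
def Claim_equal_construct_footprint_matrix : Prop := ∀ (direct_succession : List (String × List String)) (causality : List (String × List String)) (parallel : List (String × List String)) (choice : List (String × List String)), Dom_construct_footprint_matrix direct_succession causality parallel choice → Pre_construct_footprint_matrix direct_succession causality parallel choice → Spec_construct_footprint_matrix direct_succession causality parallel choice (construct_footprint_matrix direct_succession causality parallel choice)

-- ===== LEMMAS AND PROOFS =====

lemma pvGetD_cons (k : String) (v : List String) (d : List (String × List String)) (y : String) :
    pvGetD ((k, v) :: d) y = if k == y then v else pvGetD d y := by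
  by_cases h : k = y
  · simp [pvGetD, List.find?, h]
  · simp [pvGetD, List.find?, beq_eq_false_iff_ne.mpr h]

lemma pvGetD_of_not_mem (d : List (String × List String)) (y : String)
    (h : y ∉ d.map Prod.fst) : pvGetD d y = [] := by
  induction d with
  | nil => rfl
  | cons p d ih =>
    rw [List.map_cons] at h
    simp only [List.mem_cons, not_or] at h
    rw [show p = (p.1, p.2) from rfl, pvGetD_cons]
    rw [show (p.1 == y) = false from beq_eq_false_iff_ne.mpr (Ne.symm h.1)]
    simpa using ih h.2

-- inner scatter loop over one row of a "column" relation (key = second pair component)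
lemma get?_inner_col (g : String → String → Bool) (s : String) (y0 : String)
    (xs : List String) (r : PySem.Dict (String × String) String) (x y : String) :
    (xs.foldl (fun r x' => if g x' y0 then r.insert (x', y0) s else r) r).get? (x, y)
    = if xs.contains x && g x y0 && (y == y0) then some s else r.get? (x, y) := by
  induction xs generalizing r with
  | nil => simp
  | cons a xs ih =>
    simp only [List.foldl_cons, List.contains_cons]
    cases hg : g a y0 with
    | false =>
      rw [if_neg (by simp)]
      rw [ih]
      by_cases hxa : x = a
      · subst hxa; simp [hg]
      · simp [beq_eq_false_iff_ne.mpr hxa]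
    | true =>
      rw [if_pos rfl, ih, PySem.Dict.get?_insert]
      by_cases hxa : x = a <;> by_cases hyy : y = y0
      · subst hxa; subst hyy; simp [hg]
      · subst hxa; simp [Prod.mk.injEq, hyy, beq_eq_false_iff_ne.mpr hyy]
      · subst hyy; simp [Prod.mk.injEq, hxa, beq_eq_false_iff_ne.mpr hxa]
      · simp [Prod.mk.injEq, hxa, hyy, beq_eq_false_iff_ne.mpr hxa,
          beq_eq_false_iff_ne.mpr hyy]

-- scatter over a "column" relation d: rel[(x, y)] = s for x in d[y] (when g x y)
lemma get?_scatter_col (g : String → String → Bool) (s : String)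
    (d : List (String × List String)) (r : PySem.Dict (String × String) String)
    (hn : (d.map Prod.fst).Nodup) (x y : String) :
    (d.foldl (fun r p => p.2.foldl (fun r x' => if g x' p.1 then r.insert (x', p.1) s else r) r) r).get? (x, y)
    = if (pvGetD d y).contains x && g x y then some s else r.get? (x, y) := by
  induction d generalizing r with
  | nil => simp [pvGetD]
  | cons p d ih =>
    obtain ⟨y0, xs⟩ := p
    simp only [List.map_cons, List.nodup_cons] at hn
    simp only [List.foldl_cons, ih _ hn.2, get?_inner_col, pvGetD_cons]
    by_cases hy : y = y0
    · subst hy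
      rw [pvGetD_of_not_mem d y hn.1]
      simp
    · simp [show (y0 == y) = false from beq_eq_false_iff_ne.mpr (Ne.symm hy),
        show (y == y0) = false from beq_eq_false_iff_ne.mpr hy]

-- the unguarded column stages (choice "#", parallel "||")
lemma get?_scatter_col' (s : String)
    (d : List (String × List String)) (r : PySem.Dict (String × String) String)
    (hn : (d.map Prod.fst).Nodup) (x y : String) :
    (d.foldl (fun r p => p.2.foldl (fun r x' => r.insert (x', p.1) s) r) r).get? (x, y)
    = if (pvGetD d y).contains x then some s else r.get? (x, y) := by
  have h := get?_scatter_col (fun _ _ => true) s d r hn x y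
  simpa using h

-- inner scatter loop over one row of the "row" relation (key = first pair component)
lemma get?_inner_row (s : String) (x0 : String)
    (ys : List String) (r : PySem.Dict (String × String) String) (x y : String) :
    (ys.foldl (fun r y' => r.insert (x0, y') s) r).get? (x, y)
    = if ys.contains y && (x == x0) then some s else r.get? (x, y) := by
  induction ys generalizing r with
  | nil => simp
  | cons a ys ih =>
    simp only [List.foldl_cons, ih, List.contains_cons, PySem.Dict.get?_insert]
    by_cases hx : x = x0 <;> by_cases hya : y = a
    · subst hx; subst hya; simp
    · subst hx; simp [Prod.mk.injEq, hya]
    · subst hya; simp [Prod.mk.injEq, hx, beq_eq_false_iff_ne.mpr hx]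
    · simp [Prod.mk.injEq, hx, hya, beq_eq_false_iff_ne.mpr hx]

-- scatter over the "row" relation (causality): rel[(x, y)] = s for y in d[x]
lemma get?_scatter_row (s : String)
    (d : List (String × List String)) (r : PySem.Dict (String × String) String)
    (hn : (d.map Prod.fst).Nodup) (x y : String) :
    (d.foldl (fun r p => p.2.foldl (fun r y' => r.insert (p.1, y') s) r) r).get? (x, y)
    = if (pvGetD d x).contains y then some s else r.get? (x, y) := by
  induction d generalizing r with
  | nil => simp [pvGetD]
  | cons p d ih =>
    obtain ⟨x0, ys⟩ := p
    simp only [List.map_cons, List.nodup_cons] at hn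
    simp only [List.foldl_cons, ih _ hn.2, get?_inner_row, pvGetD_cons]
    by_cases hx : x = x0
    · subst hx
      rw [pvGetD_of_not_mem d x hn.1]
      simp
    · simp [show (x0 == x) = false from beq_eq_false_iff_ne.mpr (Ne.symm hx),
        show (x == x0) = false from beq_eq_false_iff_ne.mpr hx]

-- A's conditional-append row loop is a filterMap
lemma foldl_append_opt {α β : Type} (f : α → Option β) (l : List α) (acc : List β) :
    l.foldl (fun r y => match f y with | some b => r ++ [b] | none => r) acc
    = acc ++ l.filterMap f := by
  induction l generalizing acc with
  | nil => simp
  | cons a l ih =>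
    simp only [List.foldl_cons, List.filterMap_cons]
    cases h : f a <;> simp [ih]

theorem construct_footprint_matrix_eq_alt (direct_succession causality parallel choice : List (String × List String))
    (hds : (direct_succession.map Prod.fst).Nodup) (hca : (causality.map Prod.fst).Nodup)
    (hpa : (parallel.map Prod.fst).Nodup) (hch : (choice.map Prod.fst).Nodup) :
    construct_footprint_matrix direct_succession causality parallel choice
    = construct_footprint_matrix_alt direct_succession causality parallel choice := by
  unfold construct_footprint_matrix construct_footprint_matrix_alt
  simp only []
  set acts := PySem.Set.ofList (direct_succession.map Prod.fst) with hacts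
  rw [PySem.List.foldl_append_singleton_eq_map]
  rw [List.nil_append]
  apply List.map_congr_left
  intro x _
  -- characterize B's sparse dict at (x, y)
  have hrel : ∀ y : String,
      (causality.foldl (fun r p => p.2.foldl (fun r y' => r.insert (p.1, y') "->") r)
        (direct_succession.foldl (fun r p => p.2.foldl (fun r x' =>
            if !((pvGetD direct_succession x').contains p.1) then r.insert (x', p.1) ">" else r) r)
          (parallel.foldl (fun r p => p.2.foldl (fun r x' => r.insert (x', p.1) "||") r)
            (choice.foldl (fun r p => p.2.foldl (fun r x' => r.insert (x', p.1) "#") r)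
              PySem.Dict.empty)))).get? (x, y)
      = (if (pvGetD causality x).contains y then some "->"
         else if (pvGetD direct_succession y).contains x && !((pvGetD direct_succession x).contains y) then some ">"
         else if (pvGetD parallel y).contains x then some "||"
         else if (pvGetD choice y).contains x then some "#"
         else none) := by
    intro y
    rw [get?_scatter_row _ _ _ hca,
        get?_scatter_col (fun x' y' => !((pvGetD direct_succession x').contains y')) _ _ _ hds,
        get?_scatter_col' _ _ _ hpa, get?_scatter_col' _ _ _ hch,
        PySem.Dict.get?_empty]
  -- the row: A's conditional-append loop equals B's filterMap cell by cell
  have h2 := foldl_append_opt (fun y =>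
      if x == y then some (y, (none : Option String))
      else match (if (pvGetD causality x).contains y then some "->"
                  else if (pvGetD direct_succession y).contains x && !((pvGetD direct_succession x).contains y) then some ">"
                  else if (pvGetD parallel y).contains x then some "||"
                  else if (pvGetD choice y).contains x then some "#"
                  else none : Option String) with
        | some s => some (y, some s)
        | none => none) acts []
  rw [List.nil_append] at h2
  refine Prod.ext rfl ?_
  show _ = acts.filterMap _
  calc acts.foldl _ [] = acts.filterMap _ := by
        rw [← h2]
        apply List.foldl_ext
        intro r y _
        split_ifs <;> rfl
    _ = _ := by
        apply List.filterMap_congr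
        intro y _
        rw [hrel y]

-- ===== VERDICT (by name: the statement is the Claim_ definition above) =====
theorem construct_footprint_matrix_spec : Claim_equal_construct_footprint_matrix := by
  intro ds ca pa ch _ hpre
  unfold Spec_construct_footprint_matrix
  exact construct_footprint_matrix_eq_alt ds ca pa ch hpre.1 hpre.2.1 hpre.2.2.1 hpre.2.2.2
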